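-- pv_equiv track=rewrite | github.com/ekansa/open-context-py | opencontext_py/apps/imports/poggiociv/images.py | get_pc_number
-- ===== SOURCE A (Python) =====
-- def get_pc_number(filename):
--     """ gets the pc number from a file name
--         Example: '19660027.jpg'
--     """
--     id_str = None
--     if isinstance(filename, str):
--         f_len = len(filename)
--         if f_len > 8:
--             f_len = 8
--         i = 0
--         id_part = True
--         id_str = 'PC '
--         while i < f_len:
--             if id_part:
--                 if filename[i].isdigit():
--                     id_str += str(filename[i])
--                 else:
--                     id_part = False
--             if id_part is False and i <= 4:
--                 id_str = None
--             i += 1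
--     return id_str
-- ===== SOURCE B (Python) =====
-- def get_pc_number(filename):
--     """Compute the leading-digit boundary of the 8-char prefix once, then one closed condition."""
--     if not isinstance(filename, str):
--         return None
--     prefix = filename[:8]
--     n = next((i for i, c in enumerate(prefix) if not c.isdigit()), len(prefix))
--     if n < len(prefix) and n <= 4:
--         return None
--     return 'PC ' + prefix[:n]
-- ===== Notes on version B (the rewrite author's own statement) =====
-- stated objective: simpler
-- what changed: Replaces A's flag-driven while loop with repeated None-reassignment by computing the leading-digit boundary n of the 8-char prefix once and deciding with a single closed condition (n < len(prefix) and n <= 4).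
import Mathlib
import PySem

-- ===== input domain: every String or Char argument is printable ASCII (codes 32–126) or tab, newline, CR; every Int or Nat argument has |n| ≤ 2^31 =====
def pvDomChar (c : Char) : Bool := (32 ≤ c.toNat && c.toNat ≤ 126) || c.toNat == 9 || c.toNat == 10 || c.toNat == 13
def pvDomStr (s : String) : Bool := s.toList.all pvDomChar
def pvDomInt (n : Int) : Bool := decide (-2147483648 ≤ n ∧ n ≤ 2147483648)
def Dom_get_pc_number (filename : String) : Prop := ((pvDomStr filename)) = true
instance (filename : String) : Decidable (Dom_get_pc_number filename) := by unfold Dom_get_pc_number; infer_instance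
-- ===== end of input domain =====

-- B replaces A's flag-driven scan with "compute the leading-digit boundary once, then one closed condition" (simpler decomposition, same cost).

-- ===== PORT A =====
-- A's while loop: i runs from 0 to f_len and reads filename[i], so we walk the first f_len
-- chars carrying the index i and the loop state (id_part, id_str).  Strings are handled on
-- the char-list side (PySem convention); id_str += filename[i] is the append of one char,
-- done only while id_part is true (id_str is a str then, hence the getD []).
def pcLoop : List Char → Nat → Bool → Option (List Char) → Option (List Char)
  | [], _, _, idStr => idStr
  | c :: rest, i, idPart, idStr =>
    let idPart' := if idPart then (if c.isDigit then idPart else false) else idPart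
    let idStr'  := if idPart then (if c.isDigit then some ((idStr.getD []) ++ [c]) else idStr) else idStr
    let idStr'' := if idPart' = false ∧ i ≤ 4 then none else idStr'
    pcLoop rest (i + 1) idPart' idStr''

def get_pc_number (filename : String) : Option String :=
  let cs := filename.toList
  let fLen := if cs.length > 8 then 8 else cs.length
  (pcLoop (cs.take fLen) 0 true (some "PC ".toList)).map String.ofList

-- ===== PORT B =====
def get_pc_number_alt (filename : String) : Option String :=
  let pre := filename.toList.take 8
  -- n = next((i for i,c in enumerate(prefix) if not c.isdigit()), len(prefix))
  let n := (pre.findIdx? (fun c => !c.isDigit)).getD pre.length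
  if n < pre.length ∧ n ≤ 4 then none
  else some (String.ofList ("PC ".toList ++ pre.take n))

-- ===== PRECONDITION & SPEC =====
def Spec_get_pc_number (filename : String) (out : Option String) : Prop := out = get_pc_number_alt filename
instance (filename : String) (out : Option String) : Decidable (Spec_get_pc_number filename out) := by unfold Spec_get_pc_number; infer_instance

-- ===== CLAIM (what is proved, stated in full; the proofs are below) =====
def Claim_equal_get_pc_number : Prop := ∀ (filename : String), Dom_get_pc_number filename → Spec_get_pc_number filename (get_pc_number filename)

-- ===== LEMMAS AND PROOFS =====

-- Once id_part is false and id_str is None, it stays None.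
theorem pcLoop_false_none (pre : List Char) (i : Nat) :
    pcLoop pre i false none = none := by
  induction pre generalizing i with
  | nil => rfl
  | cons c rest ih => simp [pcLoop, ih]

-- With id_part false: the first remaining iteration (if any) sets None when i ≤ 4, else nothing changes.
theorem pcLoop_false (pre : List Char) (i : Nat) (t : List Char) :
    pcLoop pre i false (some t) = if pre ≠ [] ∧ i ≤ 4 then none else some t := by
  induction pre generalizing i with
  | nil => simp [pcLoop]
  | cons c rest ih =>
    by_cases h : i ≤ 4
    · simp [pcLoop, h, pcLoop_false_none]
    · have h1 : ¬ i + 1 ≤ 4 := by omega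
      simp [pcLoop, h, ih, h1]

-- Main characterisation of A's loop started with id_part = true.
theorem pcLoop_true (pre : List Char) (i : Nat) (s : List Char) :
    pcLoop pre i true (some s) =
      (let n := (pre.findIdx? (fun c => !c.isDigit)).getD pre.length
       if n < pre.length ∧ i + n ≤ 4 then none else some (s ++ pre.take n)) := by
  induction pre generalizing i s with
  | nil => simp [pcLoop]
  | cons c rest ih =>
    by_cases hd : c.isDigit
    · -- digit: append and continue with i+1
      have hstep : pcLoop (c :: rest) i true (some s)
          = pcLoop rest (i + 1) true (some (s ++ [c])) := by
        simp [pcLoop, hd]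
      rw [hstep, ih]
      have hfi : (c :: rest).findIdx? (fun c => !c.isDigit)
          = (rest.findIdx? (fun c => !c.isDigit)).map (· + 1) := by
        simp [List.findIdx?_cons, hd]
      simp only [hfi]
      rcases h : rest.findIdx? (fun c => !c.isDigit) with _ | m
      · simp only [h, Option.map_none, Option.getD_none, List.length_cons]
        have h1 : ¬ rest.length < rest.length := by omega
        have h2 : ¬ rest.length + 1 < rest.length + 1 := by omega
        simp only [h1, h2, false_and, if_neg, not_false_iff]
        rw [show (c :: rest).take (rest.length + 1) = c :: rest.take rest.length from rfl]
        simp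
      · simp only [h, Option.map_some, Option.getD_some, List.length_cons]
        have hiff : (m + 1 < rest.length + 1 ∧ i + (m + 1) ≤ 4) ↔ (m < rest.length ∧ i + 1 + m ≤ 4) := by omega
        rw [if_congr hiff rfl rfl]
        split
        · rfl
        · rw [show (c :: rest).take (m + 1) = c :: rest.take m from rfl]
          simp
    · -- first non-digit: id_part becomes false at index i
      have hfi : (c :: rest).findIdx? (fun c => !c.isDigit) = some 0 := by
        simp [List.findIdx?_cons, hd]
      simp only [hfi, Option.getD_some, List.length_cons, List.take_zero]
      by_cases h4 : i ≤ 4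
      · have hstep : pcLoop (c :: rest) i true (some s) = pcLoop rest (i + 1) false none := by
          simp [pcLoop, hd, h4]
        rw [hstep, pcLoop_false_none]
        have hp : (0 < rest.length + 1 ∧ i + 0 ≤ 4) := ⟨by omega, by omega⟩
        rw [if_pos hp]
      · have hstep : pcLoop (c :: rest) i true (some s) = pcLoop rest (i + 1) false (some s) := by
          simp [pcLoop, hd, h4]
        rw [hstep, pcLoop_false]
        have h2 : ¬ (0 < rest.length + 1 ∧ i + 0 ≤ 4) := by omega
        have h1 : ¬ (rest ≠ [] ∧ i + 1 ≤ 4) := by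
          rintro ⟨-, h⟩; omega
        rw [if_neg h1, if_neg h2]
        simp

-- ===== VERDICT (by name: the statement is the Claim_ definition above) =====
theorem get_pc_number_spec : Claim_equal_get_pc_number := by
  intro filename _
  unfold Spec_get_pc_number get_pc_number get_pc_number_alt
  have htake : (filename.toList.take (if filename.toList.length > 8 then 8 else filename.toList.length))
      = filename.toList.take 8 := by
    split
    · rfl
    · rw [List.take_length, List.take_of_length_le (by omega)]
  simp only [htake, pcLoop_true, Nat.zero_add]
  split
  · rfl
  · rfl
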